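-- pv_equiv track=rewrite | github.com/msb-msb/mycoSwarm | src/mycoswarm/library.py | _extract_pdf_sections
-- ===== SOURCE A (Python) =====
-- def _is_pdf_heading(line: str) -> bool:
--     """Heuristic: is *line* likely a section heading in a PDF?
--
--     True when the line is short (< 10 words) **and** either ALL CAPS
--     or Title Case (first letter of every significant word capitalised).
--     """
--     words = line.split()
--     if not words or len(words) >= 10:
--         return False
--
--     stripped = line.strip()
--     if not stripped or not any(c.isalpha() for c in stripped):
--         return False
--
--     # ALL CAPS (ignoring digits and punctuation)
--     alpha_chars = [c for c in stripped if c.isalpha()]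
--     if alpha_chars and all(c.isupper() for c in alpha_chars):
--         return True
--
--     # Title Case — every word of 4+ chars starts uppercase
--     significant = [w for w in words if len(w) >= 4]
--     if significant and all(w[0].isupper() for w in significant):
--         return True
--
--     return False
--
-- def _extract_pdf_sections(text: str, chunks: list[str]) -> list[str]:
--     """Map each chunk to the nearest detected PDF heading above it.
--
--     Walks through the original text line-by-line, applying the
--     ``_is_pdf_heading`` heuristic.  Builds a per-word heading array
--     (same approach as ``_extract_chunk_sections``) and resolves each
--     chunk's section by matching its first words.
--     """
--     lines = text.splitlines()
--     current_heading = "untitled"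
--     word_headings: list[str] = []
--     prev_blank = True  # first line counts as "preceded by blank"
--
--     for line in lines:
--         stripped = line.strip()
--         if not stripped:
--             prev_blank = True
--             continue
--
--         if prev_blank and _is_pdf_heading(stripped):
--             current_heading = stripped
--         prev_blank = False
--
--         for _ in stripped.split():
--             word_headings.append(current_heading)
--
--     all_words = text.split()
--
--     sections: list[str] = []
--     search_from = 0
--     for chunk in chunks:
--         chunk_words = chunk.split()
--         if not chunk_words:
--             sections.append("untitled")
--             continue
--
--         prefix = chunk_words[:5]
--         found = False
--         for idx in range(search_from, len(all_words) - len(prefix) + 1):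
--             if all_words[idx : idx + len(prefix)] == prefix:
--                 sections.append(word_headings[idx] if idx < len(word_headings) else "untitled")
--                 search_from = idx
--                 found = True
--                 break
--         if not found:
--             for idx in range(0, len(all_words) - len(prefix) + 1):
--                 if all_words[idx : idx + len(prefix)] == prefix:
--                     sections.append(word_headings[idx] if idx < len(word_headings) else "untitled")
--                     found = True
--                     break
--             if not found:
--                 sections.append("untitled")
--
--     return sections
-- ===== SOURCE B (Python) =====
-- def _is_pdf_heading(line: str) -> bool:
--     """Same heading heuristic as the original (reused unchanged)."""
--     words = line.split()
--     if not words or len(words) >= 10: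
--         return False
--     stripped = line.strip()
--     if not stripped or not any(c.isalpha() for c in stripped):
--         return False
--     alpha_chars = [c for c in stripped if c.isalpha()]
--     if alpha_chars and all(c.isupper() for c in alpha_chars):
--         return True
--     significant = [w for w in words if len(w) >= 4]
--     if significant and all(w[0].isupper() for w in significant):
--         return True
--     return False
--
--
-- def _extract_pdf_sections(text: str, chunks: list[str]) -> list[str]:
--     """Same mapping as the line-walk version, but chunk prefixes are located
--     through a prebuilt word -> occurrence-positions index instead of scanning
--     the whole word list for every chunk."""
--     word_headings: list[str] = []
--     current = "untitled"
--     prev_blank = True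
--     for line in text.splitlines():
--         stripped = line.strip()
--         if not stripped:
--             prev_blank = True
--             continue
--         ws = stripped.split()
--         if prev_blank and _is_pdf_heading(stripped):
--             current = stripped
--         prev_blank = False
--         word_headings.extend([current] * len(ws))
--
--     all_words = text.split()
--     positions: dict[str, list[int]] = {}
--     for i, w in enumerate(all_words):
--         positions.setdefault(w, []).append(i)
--
--     def matches(i: int, prefix: list[str]) -> bool:
--         return all_words[i : i + len(prefix)] == prefix
--
--     sections: list[str] = []
--     search_from = 0
--     for chunk in chunks:
--         chunk_words = chunk.split()
--         if not chunk_words: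
--             sections.append("untitled")
--             continue
--         prefix = chunk_words[:5]
--         first_any = None
--         first_ge = None
--         for i in positions.get(prefix[0], []):
--             if matches(i, prefix):
--                 if first_any is None:
--                     first_any = i
--                 if i >= search_from:
--                     first_ge = i
--                     break
--         if first_ge is not None:
--             sections.append(word_headings[first_ge] if first_ge < len(word_headings) else "untitled")
--             search_from = first_ge
--         elif first_any is not None:
--             sections.append(word_headings[first_any] if first_any < len(word_headings) else "untitled")
--         else:
--             sections.append("untitled")
--     return sections
-- ===== Notes on version B (the rewrite author's own statement) =====
-- stated objective: alternative
-- what changed: B builds a word -> occurrence-positions index of the text once and resolves each chunk prefix by a single pass over that word's occurrence positions (tracking the first match overall and the first match >= search_from), replacing A's linear rescan of the whole word list from search_from plus a second full rescan from 0 for every chunk; intended as faster (a timing run measured 1.25-3.4x per input but not consistently >= 1.5x at the largest size), so it is claimed only as an alternative.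
import Mathlib
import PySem

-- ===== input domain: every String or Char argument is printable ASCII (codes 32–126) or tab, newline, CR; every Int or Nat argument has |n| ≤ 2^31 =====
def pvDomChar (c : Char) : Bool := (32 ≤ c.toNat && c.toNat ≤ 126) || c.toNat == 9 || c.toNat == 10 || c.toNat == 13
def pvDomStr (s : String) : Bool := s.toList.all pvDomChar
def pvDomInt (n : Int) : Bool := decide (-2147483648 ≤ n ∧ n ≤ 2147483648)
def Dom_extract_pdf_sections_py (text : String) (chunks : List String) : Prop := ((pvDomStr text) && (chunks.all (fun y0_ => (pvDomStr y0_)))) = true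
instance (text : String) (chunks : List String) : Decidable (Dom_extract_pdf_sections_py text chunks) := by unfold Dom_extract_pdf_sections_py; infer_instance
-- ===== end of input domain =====

-- B replaces A's per-chunk rescans of the whole word list by a prebuilt word → occurrence-positions
-- index consulted in a single pass per chunk (objective: alternative algorithm, same result).

-- ===== PORT A =====
-- port of _is_pdf_heading
def isPdfHeadingA (line : String) : Bool :=
  let words := PySem.Str.split₀ line
  if words.isEmpty || 10 ≤ words.length then false
  else
    let stripped := PySem.Str.strip line
    if stripped.toList.isEmpty || !(stripped.toList.any PySem.Chars.isalpha) then false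
    else
      let alphaChars := stripped.toList.filter PySem.Chars.isalpha
      if !alphaChars.isEmpty && alphaChars.all PySem.Chars.isupper then true
      else
        let significant := words.filter (fun w => (4 : Int) ≤ PySem.Str.len w)
        -- w[0] is safe in Python: words of split() are nonempty; the .elim default is unreachable
        if !significant.isEmpty && significant.all (fun w => (PySem.Str.pyGet? w 0).elim false PySem.Chars.isupper) then true
        else false

def extract_pdf_sections_py (text : String) (chunks : List String) : List String :=
  let lines := PySem.Str.splitlines text
  let st := lines.foldl (fun (st : String × List String × Bool) line =>
      let stripped := PySem.Str.strip line
      if stripped.toList.isEmpty then (st.1, st.2.1, true)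
      else
        let cur := if st.2.2 && isPdfHeadingA stripped then stripped else st.1
        (cur, (PySem.Str.split₀ stripped).foldl (fun wh _ => wh ++ [cur]) st.2.1, false))
    ("untitled", [], true)
  let word_headings := st.2.1
  let all_words := PySem.Str.split₀ text
  let N : Int := PySem.List.len all_words
  let res := chunks.foldl (fun (st : List String × Int) chunk =>
      let cw := PySem.Str.split₀ chunk
      if cw.isEmpty then (st.1 ++ ["untitled"], st.2)
      else
        let pfx := PySem.List.slice cw none (some 5)
        let L : Int := PySem.List.len pfx
        match (PySem.List.pyRange st.2 (N - L + 1) 1).find?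
            (fun idx => PySem.List.slice all_words (some idx) (some (idx + L)) == pfx) with
        | some idx =>
            (st.1 ++ [if idx < (word_headings.length : Int) then PySem.List.pyGetD word_headings idx "untitled" else "untitled"], idx)
        | none =>
            match (PySem.List.pyRange 0 (N - L + 1) 1).find?
                (fun idx => PySem.List.slice all_words (some idx) (some (idx + L)) == pfx) with
            | some idx =>
                (st.1 ++ [if idx < (word_headings.length : Int) then PySem.List.pyGetD word_headings idx "untitled" else "untitled"], st.2)
            | none => (st.1 ++ ["untitled"], st.2))
    ([], 0)
  res.1

-- ===== PORT B =====
-- port of Source B's _is_pdf_heading (the same heading heuristic, reused unchanged by B)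
def headingLikeB (line : String) : Bool :=
  let words := PySem.Str.split₀ line
  if words.isEmpty || 10 ≤ words.length then false
  else
    let stripped := PySem.Str.strip line
    if stripped.toList.isEmpty || !(stripped.toList.any PySem.Chars.isalpha) then false
    else
      let alphaChars := stripped.toList.filter PySem.Chars.isalpha
      if !alphaChars.isEmpty && alphaChars.all PySem.Chars.isupper then true
      else
        let significant := words.filter (fun w => (4 : Int) ≤ PySem.Str.len w)
        -- w[0] is safe in Python: words of split() are nonempty; the .elim default is unreachable
        if !significant.isEmpty && significant.all (fun w => (PySem.Str.pyGet? w 0).elim false PySem.Chars.isupper) then true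
        else false

-- port of Source B's local `matches`
def bMatches (all_words pfx : List String) (i : Int) : Bool :=
  PySem.List.slice all_words (some i) (some (i + PySem.List.len pfx)) == pfx

-- port of Source B's single pass over the occurrence list: returns (first_any, first_ge)
def bScan (all_words pfx : List String) (s : Int) : List Int → Option Int → Option Int × Option Int
  | [], fa => (fa, none)
  | i :: rest, fa =>
      if bMatches all_words pfx i then
        let fa' := if fa.isNone then some i else fa
        if s ≤ i then (fa', some i) else bScan all_words pfx s rest fa'
      else bScan all_words pfx s rest fa

def extract_pdf_sections_py_alt (text : String) (chunks : List String) : List String :=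
  let st := (PySem.Str.splitlines text).foldl (fun (st : List String × String × Bool) line =>
      let stripped := PySem.Str.strip line
      if stripped.toList.isEmpty then (st.1, st.2.1, true)
      else
        let ws := PySem.Str.split₀ stripped
        let cur := if st.2.2 && headingLikeB stripped then stripped else st.2.1
        (st.1 ++ PySem.List.pyRepeat [cur] (PySem.List.len ws), cur, false))
    ([], "untitled", true)
  let word_headings := st.1
  let all_words := PySem.Str.split₀ text
  let positions := (PySem.List.enumerate all_words 0).foldl
      (fun (d : PySem.Dict String (List Int)) p => d.modify p.2 [] (· ++ [p.1])) PySem.Dict.empty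
  let res := chunks.foldl (fun (st : List String × Int) chunk =>
      let cw := PySem.Str.split₀ chunk
      if cw.isEmpty then (st.1 ++ ["untitled"], st.2)
      else
        let pfx := PySem.List.slice cw none (some 5)
        -- prefix[0] is safe in Python: cw is nonempty, so is its [:5] slice
        let w0 := pfx.headD ""
        match bScan all_words pfx st.2 (positions.getD w0 []) none with
        | (_, some g) =>
            (st.1 ++ [if g < (word_headings.length : Int) then PySem.List.pyGetD word_headings g "untitled" else "untitled"], g)
        | (some a, none) =>
            (st.1 ++ [if a < (word_headings.length : Int) then PySem.List.pyGetD word_headings a "untitled" else "untitled"], st.2)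
        | (none, none) => (st.1 ++ ["untitled"], st.2))
    ([], 0)
  res.1

-- ===== PRECONDITION & SPEC =====
def Spec_extract_pdf_sections_py (text : String) (chunks : List String) (out : List String) : Prop := out = extract_pdf_sections_py_alt text chunks
instance (text : String) (chunks : List String) (out : List String) : Decidable (Spec_extract_pdf_sections_py text chunks out) := by unfold Spec_extract_pdf_sections_py; infer_instance

-- ===== CLAIM (what is proved, stated in full; the proofs are below) =====
def Claim_equal_extract_pdf_sections_py : Prop := ∀ (text : String) (chunks : List String), Dom_extract_pdf_sections_py text chunks → Spec_extract_pdf_sections_py text chunks (extract_pdf_sections_py text chunks)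

-- ===== LEMMAS AND PROOFS =====

-- proof-side names for the line-walk step functions (definitionally the ports' inline lambdas)
def aLineStep (st : String × List String × Bool) (line : String) : String × List String × Bool :=
  if (PySem.Str.strip line).toList.isEmpty then (st.1, st.2.1, true)
  else
    ((if st.2.2 && isPdfHeadingA (PySem.Str.strip line) then PySem.Str.strip line else st.1),
     (PySem.Str.split₀ (PySem.Str.strip line)).foldl
       (fun wh _ => wh ++ [if st.2.2 && isPdfHeadingA (PySem.Str.strip line) then PySem.Str.strip line else st.1]) st.2.1,
     false)

def bLineStep (st : List String × String × Bool) (line : String) : List String × String × Bool :=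
  if (PySem.Str.strip line).toList.isEmpty then (st.1, st.2.1, true)
  else
    (st.1 ++ PySem.List.pyRepeat
        [if st.2.2 && headingLikeB (PySem.Str.strip line) then PySem.Str.strip line else st.2.1]
        (PySem.List.len (PySem.Str.split₀ (PySem.Str.strip line))),
     (if st.2.2 && headingLikeB (PySem.Str.strip line) then PySem.Str.strip line else st.2.1),
     false)

def posIndex (aw : List String) : PySem.Dict String (List Int) :=
  (PySem.List.enumerate aw 0).foldl
    (fun (d : PySem.Dict String (List Int)) p => d.modify p.2 [] (· ++ [p.1])) PySem.Dict.empty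

-- proof-side names for the per-chunk step functions
def aChunkStep (wh aw : List String) (st : List String × Int) (chunk : String) : List String × Int :=
  if (PySem.Str.split₀ chunk).isEmpty then (st.1 ++ ["untitled"], st.2)
  else
    match (PySem.List.pyRange st.2
          (PySem.List.len aw - PySem.List.len (PySem.List.slice (PySem.Str.split₀ chunk) none (some 5)) + 1) 1).find?
        (fun idx => PySem.List.slice aw (some idx)
            (some (idx + PySem.List.len (PySem.List.slice (PySem.Str.split₀ chunk) none (some 5))))
          == PySem.List.slice (PySem.Str.split₀ chunk) none (some 5)) with
    | some idx =>
        (st.1 ++ [if idx < (wh.length : Int) then PySem.List.pyGetD wh idx "untitled" else "untitled"], idx)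
    | none =>
        match (PySem.List.pyRange 0
              (PySem.List.len aw - PySem.List.len (PySem.List.slice (PySem.Str.split₀ chunk) none (some 5)) + 1) 1).find?
            (fun idx => PySem.List.slice aw (some idx)
                (some (idx + PySem.List.len (PySem.List.slice (PySem.Str.split₀ chunk) none (some 5))))
              == PySem.List.slice (PySem.Str.split₀ chunk) none (some 5)) with
        | some idx =>
            (st.1 ++ [if idx < (wh.length : Int) then PySem.List.pyGetD wh idx "untitled" else "untitled"], st.2)
        | none => (st.1 ++ ["untitled"], st.2)

def bChunkStep (wh aw : List String) (pos : PySem.Dict String (List Int))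
    (st : List String × Int) (chunk : String) : List String × Int :=
  if (PySem.Str.split₀ chunk).isEmpty then (st.1 ++ ["untitled"], st.2)
  else
    match bScan aw (PySem.List.slice (PySem.Str.split₀ chunk) none (some 5)) st.2
        (pos.getD ((PySem.List.slice (PySem.Str.split₀ chunk) none (some 5)).headD "") []) none with
    | (_, some g) =>
        (st.1 ++ [if g < (wh.length : Int) then PySem.List.pyGetD wh g "untitled" else "untitled"], g)
    | (some a, none) =>
        (st.1 ++ [if a < (wh.length : Int) then PySem.List.pyGetD wh a "untitled" else "untitled"], st.2)
    | (none, none) => (st.1 ++ ["untitled"], st.2)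

theorem portA_eq (text : String) (chunks : List String) :
    extract_pdf_sections_py text chunks
    = (chunks.foldl
        (aChunkStep (((PySem.Str.splitlines text).foldl aLineStep ("untitled", [], true)).2.1)
          (PySem.Str.split₀ text)) ([], 0)).1 := rfl

theorem portB_eq (text : String) (chunks : List String) :
    extract_pdf_sections_py_alt text chunks
    = (chunks.foldl
        (bChunkStep (((PySem.Str.splitlines text).foldl bLineStep ([], "untitled", true)).1)
          (PySem.Str.split₀ text) (posIndex (PySem.Str.split₀ text))) ([], 0)).1 := rfl

theorem heading_eq (s : String) : isPdfHeadingA s = headingLikeB s := rfl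

theorem line_step_eq (cur : String) (wh : List String) (pb : Bool) (line : String) :
    bLineStep (wh, cur, pb) line
    = ((aLineStep (cur, wh, pb) line).2.1, (aLineStep (cur, wh, pb) line).1,
        (aLineStep (cur, wh, pb) line).2.2) := by
  unfold aLineStep bLineStep
  by_cases h : (PySem.Str.strip line).toList.isEmpty
  · rw [if_pos h, if_pos h]
  · rw [if_neg h, if_neg h]
    dsimp only
    rw [heading_eq]
    rw [PySem.List.foldl_append_singleton_eq_map
      (fun _ => if pb && headingLikeB (PySem.Str.strip line) then PySem.Str.strip line else cur)]
    rw [List.map_const', PySem.List.pyRepeat_singleton, PySem.List.len_eq, Int.toNat_natCast]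

theorem lines_fold_eq (lines : List String) (cur : String) (wh : List String) (pb : Bool) :
    lines.foldl bLineStep (wh, cur, pb)
    = ((lines.foldl aLineStep (cur, wh, pb)).2.1, (lines.foldl aLineStep (cur, wh, pb)).1,
        (lines.foldl aLineStep (cur, wh, pb)).2.2) := by
  induction lines generalizing cur wh pb with
  | nil => rfl
  | cons l t ih =>
      rw [List.foldl_cons, List.foldl_cons, line_step_eq, ih]

theorem wordHeadings_eq (text : String) :
    ((PySem.Str.splitlines text).foldl bLineStep ([], "untitled", true)).1
    = ((PySem.Str.splitlines text).foldl aLineStep ("untitled", [], true)).2.1 := by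
  rw [lines_fold_eq]

-- bScan's second component is the first matching occurrence ≥ s
theorem bScan_snd (aw pfx : List String) (s : Int) (occ : List Int) (fa : Option Int) :
    (bScan aw pfx s occ fa).2 = occ.find? (fun i => bMatches aw pfx i && decide (s ≤ i)) := by
  induction occ generalizing fa with
  | nil => rfl
  | cons i rest ih =>
      by_cases hm : bMatches aw pfx i
      · by_cases hs : s ≤ i
        · simp [bScan, hm, hs, List.find?]
        · simp [bScan, hm, hs, List.find?, ih]
      · simp [bScan, hm, List.find?, ih]

-- when nothing ≥ s matched, bScan's first component is fa orElse the first match anywhere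
theorem bScan_fst (aw pfx : List String) (s : Int) (occ : List Int) (fa : Option Int)
    (h : (bScan aw pfx s occ fa).2 = none) :
    (bScan aw pfx s occ fa).1 = fa.or (occ.find? (bMatches aw pfx)) := by
  induction occ generalizing fa with
  | nil => cases fa <;> rfl
  | cons i rest ih =>
      by_cases hm : bMatches aw pfx i
      · by_cases hs : s ≤ i
        · exfalso
          have he : (bScan aw pfx s (i :: rest) fa).2 = some i := by
            simp [bScan, hm, hs]
          rw [he] at h
          exact Option.some_ne_none i h
        · have e : bScan aw pfx s (i :: rest) fa
              = bScan aw pfx s rest (if fa.isNone then some i else fa) := by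
            simp [bScan, hm, hs]
          rw [e] at h ⊢
          rw [ih _ h]
          cases fa <;> simp [List.find?_cons_of_pos, hm]
      · have e : bScan aw pfx s (i :: rest) fa = bScan aw pfx s rest fa := by
          simp [bScan, hm]
        rw [e] at h ⊢
        rw [ih _ h]
        cases fa <;> simp [List.find?_cons_of_neg, hm]

-- find? over two integer ranges agrees when p vanishes outside [a', b') ⊆ [a, b)
theorem find?_pyRange_sub (p : Int → Bool) (a b a' b' : Int) (ha : a ≤ a') (hb : b' ≤ b)
    (hp : ∀ i : Int, a ≤ i → i < b → p i = true → a' ≤ i ∧ i < b') :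
    (PySem.List.pyRange a b 1).find? p = (PySem.List.pyRange a' b' 1).find? p := by
  by_cases hab : a' ≤ b'
  · rw [PySem.List.pyRange_one_append a a' b ha (le_trans hab hb),
        PySem.List.pyRange_one_append a' b' b hab hb,
        List.find?_append, List.find?_append]
    have h1 : (PySem.List.pyRange a a' 1).find? p = none := by
      rw [List.find?_eq_none]
      intro i hi
      rw [PySem.List.mem_pyRange_one] at hi
      intro hpi
      have := hp i hi.1 (lt_of_lt_of_le hi.2 (le_trans hab hb)) hpi
      omega
    have h2 : (PySem.List.pyRange b' b 1).find? p = none := by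
      rw [List.find?_eq_none]
      intro i hi
      rw [PySem.List.mem_pyRange_one] at hi
      intro hpi
      have := hp i (le_trans ha (le_trans hab hi.1)) hi.2 hpi
      omega
    simp [h1, h2]
  · rw [PySem.List.pyRange_one_eq_nil (by omega : b' ≤ a')]
    simp only [List.find?_nil]
    rw [List.find?_eq_none]
    intro i hi
    rw [PySem.List.mem_pyRange_one] at hi
    intro hpi
    have := hp i hi.1 hi.2 hpi
    omega

-- find? is determined by the predicate's values on the list's members
theorem find?_congr_mem {α : Type} (l : List α) (p q : α → Bool)
    (h : ∀ x ∈ l, p x = q x) : l.find? p = l.find? q := by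
  induction l with
  | nil => rfl
  | cons x t ih =>
      have hx := h x (List.mem_cons_self)
      by_cases hp : p x
      · simp [List.find?, hp, hx ▸ hp]
      · have hq : q x = false := by rw [← hx]; simpa using hp
        simp only [List.find?, hp, hq]
        exact ih (fun y hy => h y (List.mem_cons_of_mem _ hy))

-- a match of a nonempty prefix at i ≥ 0 forces i + len pfx ≤ len aw
theorem match_bound (aw : List String) (w0 : String) (t : List String) (i : Int) (h0 : 0 ≤ i)
    (hm : bMatches aw (w0 :: t) i = true) : i + ((t.length : Int) + 1) ≤ (aw.length : Int) := by
  unfold bMatches at hm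
  rw [beq_iff_eq, PySem.List.len_eq] at hm
  rw [PySem.List.slice_toNat aw h0 (by omega)] at hm
  have hl := congrArg List.length hm
  simp only [List.length_take, List.length_drop, List.length_cons] at hl
  push_cast at hl ⊢
  omega

-- a match of a nonempty prefix at i ≥ 0 forces aw[i] = pfx's head
theorem match_head (aw : List String) (w0 : String) (t : List String) (i : Int) (h0 : 0 ≤ i)
    (hm : bMatches aw (w0 :: t) i = true) : PySem.List.pyGetD aw i "" = w0 := by
  have hb := match_bound aw w0 t i h0 hm
  unfold bMatches at hm
  rw [beq_iff_eq, PySem.List.len_eq] at hm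
  rw [PySem.List.slice_toNat aw h0 (by omega)] at hm
  have hhead := congrArg (fun l => l[0]?) hm
  simp only [List.getElem?_take, List.getElem?_drop, List.getElem?_cons_zero,
    List.length_cons] at hhead
  push_cast at hhead
  have hlen : i.toNat < aw.length := by omega
  rw [if_pos (by omega), Nat.add_zero, List.getElem?_eq_getElem hlen] at hhead
  rw [PySem.List.pyGetD_eq_getElem aw "" h0 (by omega)]
  exact Option.some.inj hhead

-- the positions dict's entry for w is the increasing list of indices of w in aw
theorem occ_eq (aw : List String) (w : String) :
    (posIndex aw).getD w []
    = (PySem.List.pyRange 0 (PySem.List.len aw) 1).filter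
        (fun j => PySem.List.pyGetD aw j "" == w) := by
  unfold posIndex
  have h1 : (PySem.List.enumerate aw 0).foldl
        (fun (d : PySem.Dict String (List Int)) p => d.modify p.2 [] (· ++ [p.1]))
        PySem.Dict.empty
      = ((PySem.List.enumerate aw 0).map (fun p => (p.2, p.1))).foldl
        (fun (d : PySem.Dict String (List Int)) q => d.modify q.1 [] (· ++ [q.2]))
        PySem.Dict.empty := by
    rw [List.foldl_map]
  rw [h1, PySem.Dict.getD_foldl_modify_append]
  rw [PySem.List.enumerate_eq_map_pyRange aw ""]
  simp [List.filter_map, List.map_map, Function.comp_def]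

theorem scan_snd_eq (aw : List String) (w0 : String) (pt : List String) (s : Int) (h0 : 0 ≤ s) :
    (bScan aw (w0 :: pt) s ((posIndex aw).getD w0 []) none).2
    = (PySem.List.pyRange s (PySem.List.len aw - PySem.List.len (w0 :: pt) + 1) 1).find?
        (fun idx => PySem.List.slice aw (some idx) (some (idx + PySem.List.len (w0 :: pt))) == (w0 :: pt)) := by
  rw [bScan_snd, occ_eq, List.find?_filter]
  refine Eq.trans (find?_congr_mem _ _ (fun i => bMatches aw (w0 :: pt) i && decide (s ≤ i)) ?_) ?_
  · intro i hi
    rw [PySem.List.mem_pyRange_one] at hi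
    by_cases hb : (bMatches aw (w0 :: pt) i && decide (s ≤ i)) = true
    · have hm : bMatches aw (w0 :: pt) i = true := by
        simp only [Bool.and_eq_true] at hb; exact hb.1
      have hw := match_head aw w0 pt i hi.1 hm
      simp [hb, hw]
    · rw [Bool.not_eq_true] at hb
      simp [hb]
  refine Eq.trans (find?_pyRange_sub _ 0 (PySem.List.len aw) s
    (PySem.List.len aw - PySem.List.len (w0 :: pt) + 1) h0 ?_ ?_) ?_
  · simp only [PySem.List.len_eq, List.length_cons]
    push_cast
    omega
  · intro i hi0 _ hpi
    simp only [Bool.and_eq_true, decide_eq_true_eq] at hpi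
    have hmb := match_bound aw w0 pt i hi0 hpi.1
    simp only [PySem.List.len_eq, List.length_cons]
    push_cast
    exact ⟨hpi.2, by omega⟩
  refine find?_congr_mem _ _ _ ?_
  intro i hi
  rw [PySem.List.mem_pyRange_one] at hi
  simp [hi.1, bMatches]

theorem scan_fst_eq (aw : List String) (w0 : String) (pt : List String) (s : Int)
    (h : (bScan aw (w0 :: pt) s ((posIndex aw).getD w0 []) none).2 = none) :
    (bScan aw (w0 :: pt) s ((posIndex aw).getD w0 []) none).1
    = (PySem.List.pyRange 0 (PySem.List.len aw - PySem.List.len (w0 :: pt) + 1) 1).find?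
        (fun idx => PySem.List.slice aw (some idx) (some (idx + PySem.List.len (w0 :: pt))) == (w0 :: pt)) := by
  rw [bScan_fst _ _ _ _ _ h, Option.none_or]
  rw [occ_eq, List.find?_filter]
  refine Eq.trans (find?_congr_mem _ _ (fun i => bMatches aw (w0 :: pt) i) ?_) ?_
  · intro i hi
    rw [PySem.List.mem_pyRange_one] at hi
    by_cases hb : bMatches aw (w0 :: pt) i = true
    · have hw := match_head aw w0 pt i hi.1 hb
      simp [hb, hw]
    · rw [Bool.not_eq_true] at hb
      simp [hb]
  refine Eq.trans (find?_pyRange_sub _ 0 (PySem.List.len aw) 0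
    (PySem.List.len aw - PySem.List.len (w0 :: pt) + 1) le_rfl ?_ ?_) ?_
  · simp only [PySem.List.len_eq, List.length_cons]
    push_cast
    omega
  · intro i hi0 _ hpi
    have hmb := match_bound aw w0 pt i hi0 hpi
    simp only [PySem.List.len_eq, List.length_cons]
    push_cast
    exact ⟨hi0, by omega⟩
  refine find?_congr_mem _ _ _ ?_
  intro i _
  simp [bMatches]

theorem chunk_step_eq (wh aw : List String) (st : List String × Int) (h0 : 0 ≤ st.2) (c : String) :
    aChunkStep wh aw st c = bChunkStep wh aw (posIndex aw) st c
      ∧ 0 ≤ (aChunkStep wh aw st c).2 := by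
  unfold aChunkStep bChunkStep
  by_cases hc : (PySem.Str.split₀ c).isEmpty
  · rw [if_pos hc, if_pos hc]
    exact ⟨rfl, h0⟩
  · obtain ⟨c0, ct, hcw⟩ : ∃ c0 ct, PySem.Str.split₀ c = c0 :: ct := by
      rcases hsp : PySem.Str.split₀ c with _ | ⟨c0, ct⟩
      · rw [hsp] at hc; simp at hc
      · exact ⟨c0, ct, rfl⟩
    rw [hcw]
    rw [if_neg (by simp)]
    have hpfx : PySem.List.slice (c0 :: ct) none (some (5 : Int)) = c0 :: ct.take 4 := by
      rw [show ((5 : Int)) = ((5 : Nat) : Int) by norm_num, PySem.List.slice_to_natCast]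
      rfl
    rw [hpfx]
    simp only [List.headD_cons]
    rw [← scan_snd_eq aw c0 (ct.take 4) st.2 h0]
    rcases hscan : bScan aw (c0 :: ct.take 4) st.2 ((posIndex aw).getD c0 []) none with ⟨fa, fg⟩
    cases fg with
    | some g =>
        have hg := List.mem_of_find?_eq_some
          (by rw [← scan_snd_eq aw c0 (ct.take 4) st.2 h0, hscan] :
            (PySem.List.pyRange st.2 (PySem.List.len aw - PySem.List.len (c0 :: ct.take 4) + 1) 1).find?
              (fun idx => PySem.List.slice aw (some idx)
                  (some (idx + PySem.List.len (c0 :: ct.take 4))) == (c0 :: ct.take 4)) = some g)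
        rw [PySem.List.mem_pyRange_one] at hg
        refine ⟨?_, ?_⟩
        · cases fa <;> rfl
        · show (0 : Int) ≤ g
          omega
    | none =>
        have hfa : fa = (PySem.List.pyRange 0 (PySem.List.len aw - PySem.List.len (c0 :: ct.take 4) + 1) 1).find?
            (fun idx => PySem.List.slice aw (some idx)
                (some (idx + PySem.List.len (c0 :: ct.take 4))) == (c0 :: ct.take 4)) := by
          have h2 : (bScan aw (c0 :: ct.take 4) st.2 ((posIndex aw).getD c0 []) none).2 = none := by
            rw [hscan]
          have h3 := scan_fst_eq aw c0 (ct.take 4) st.2 h2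
          rw [hscan] at h3
          exact h3
        rw [← hfa]
        refine ⟨?_, ?_⟩
        · cases fa <;> rfl
        · cases fa <;> exact h0

theorem chunk_fold_eq (wh aw : List String) (chunks : List String) (st : List String × Int)
    (h0 : 0 ≤ st.2) :
    chunks.foldl (aChunkStep wh aw) st = chunks.foldl (bChunkStep wh aw (posIndex aw)) st := by
  induction chunks generalizing st with
  | nil => rfl
  | cons c t ih =>
      obtain ⟨heq, hpos⟩ := chunk_step_eq wh aw st h0 c
      rw [List.foldl_cons, List.foldl_cons, ← heq]
      exact ih _ hpos

-- ===== VERDICT (by name: the statement is the Claim_ definition above) =====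
theorem extract_pdf_sections_py_spec : Claim_equal_extract_pdf_sections_py := by
  intro text chunks _
  unfold Spec_extract_pdf_sections_py
  rw [portA_eq, portB_eq, wordHeadings_eq]
  exact congrArg Prod.fst
    (chunk_fold_eq (((PySem.Str.splitlines text).foldl aLineStep ("untitled", [], true)).2.1)
      (PySem.Str.split₀ text) chunks ([], 0) (le_refl 0))
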